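-- pv_equiv track=rewrite | github.com/miliar/Code_Jam_Webscraper | solutions_python/Problem_117/1626.py | solve
-- ===== SOURCE A (Python) =====
-- def solve(matrix):
--     for y in range(len(matrix) - 1):
--         for x in range(len(matrix[0]) - 1):
--             center = int(matrix[y][x])
--             op = int(matrix[y+1][x+1])
--             if op > center:
--                 if int(matrix[y][x+1]) > center and int(matrix[y+1][x]) > center:
--                     return "NO"
--             elif op < center:
--                 if int(matrix[y][x+1]) != op and int(matrix[y+1][x]) != op:
--                     return "NO"
--
--             else:
--                 if int(matrix[y][x+1]) != op and int(matrix[y+1][x]) != op: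
--                     return "NO"
--
--     for y in range(len(matrix)):
--         for x in range(len(matrix[0])):
--             for t in range(len(matrix)):
--                 for u in range(len(matrix[y])):
--                     if u != x and t != y:
--                         center = int(matrix[y][x])
--                         if int(matrix[t][u]) >= center and (int(matrix[t][x]) < center or int(matrix[y][u]) < center):
--                             return "NO"
--
--
--
--     return "YES"
-- ===== SOURCE B (Python) =====
-- def solve(matrix):
--     n = len(matrix)
--     if n == 0:
--         return "YES"
--     m = len(matrix[0])
--     # phase 1: scan 2x2 blocks (the two identical elif/else branches of A merged)
--     for y in range(n - 1):
--         row, nxt = matrix[y], matrix[y + 1]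
--         for x in range(m - 1):
--             c, op = row[x], nxt[x + 1]
--             if op > c:
--                 if row[x + 1] > c and nxt[x] > c:
--                     return "NO"
--             elif row[x + 1] != op and nxt[x] != op:
--                 return "NO"
--
--     # phase 2: per-row / per-column prefix & suffix maxima give
--     # max-with-one-index-excluded in O(1), so each center costs O(n+m)
--     def tables(vals):
--         k = len(vals)
--         pre = [None] * (k + 1)
--         for i in range(k):
--             v = vals[i]
--             pre[i + 1] = v if pre[i] is None or v > pre[i] else pre[i]
--         suf = [None] * (k + 1)
--         for i in range(k - 1, -1, -1):
--             v = vals[i]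
--             suf[i] = v if suf[i + 1] is None or v > suf[i + 1] else suf[i + 1]
--         return pre, suf
--
--     def comb(a, b):
--         if b is None:
--             return a
--         if a is None:
--             return b
--         return a if a >= b else b
--
--     rows = [tables(r) for r in matrix]
--     cols = [tables([r[u] for r in matrix]) for u in range(m)]
--
--     for y in range(n):
--         for x in range(m):
--             c = matrix[y][x]
--             for t in range(n):
--                 if t != y and matrix[t][x] < c:
--                     pre, suf = rows[t]
--                     mx = comb(pre[x], suf[x + 1])
--                     if mx is not None and mx >= c:
--                         return "NO"
--             for u in range(m):
--                 if u != x and matrix[y][u] < c: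
--                     pre, suf = cols[u]
--                     mx = comb(pre[y], suf[y + 1])
--                     if mx is not None and mx >= c:
--                         return "NO"
--     return "YES"
-- ===== Notes on version B (the rewrite author's own statement) =====
-- stated objective: faster
-- what changed: B replaces A's O(n^2*m^2) quadruple scan with per-row/per-column prefix and suffix maxima, so 'is there an element >= center elsewhere in this row/column' is answered in O(1) and each center costs O(n+m) instead of O(n*m).
-- outside the precondition, e.g. on solve([[5], []]): A returns 'YES', B raises IndexError; on solve([[0, 1], [1, 1], [9]]): A returns 'NO', B returns 'NO'
import Mathlib
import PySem

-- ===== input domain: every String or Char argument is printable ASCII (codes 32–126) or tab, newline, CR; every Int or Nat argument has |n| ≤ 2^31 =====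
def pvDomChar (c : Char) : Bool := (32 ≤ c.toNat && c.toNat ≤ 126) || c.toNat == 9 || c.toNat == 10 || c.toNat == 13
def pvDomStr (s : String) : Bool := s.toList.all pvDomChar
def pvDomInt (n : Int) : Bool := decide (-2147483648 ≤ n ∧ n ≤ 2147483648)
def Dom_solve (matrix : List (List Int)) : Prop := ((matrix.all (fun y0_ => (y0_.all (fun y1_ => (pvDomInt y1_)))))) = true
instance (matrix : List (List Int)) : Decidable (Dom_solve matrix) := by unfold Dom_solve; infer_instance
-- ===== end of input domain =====

-- B replaces A's O(n^2·m^2) quadruple scan by per-row/per-column prefix & suffix maxima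
-- (max with one index excluded in O(1)), giving O(n·m·(n+m)); same "YES"/"NO" value.

-- ===== PORT A =====
-- matrix[y][x] (indices produced by range(), always in bounds on Pre_)
def pvGet (M : List (List Int)) (y x : Nat) : Int := (M.getD y []).getD x 0

-- condition of A's first (2x2-block) scan, three branches as in A
def aP1 (M : List (List Int)) (y x : Nat) : Bool :=
  let c := pvGet M y x
  let op := pvGet M (y+1) (x+1)
  if op > c then decide (pvGet M y (x+1) > c ∧ pvGet M (y+1) x > c)
  else if op < c then decide (pvGet M y (x+1) ≠ op ∧ pvGet M (y+1) x ≠ op)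
  else decide (pvGet M y (x+1) ≠ op ∧ pvGet M (y+1) x ≠ op)

def aRow1 (M : List (List Int)) (y : Nat) : List Nat → Option String
  | [] => none
  | x :: xs => if aP1 M y x then some "NO" else aRow1 M y xs

def aLoopY1 (M : List (List Int)) : List Nat → Option String
  | [] => none
  | y :: ys =>
    match aRow1 M y (List.range ((M.getD 0 []).length - 1)) with
    | some s => some s
    | none => aLoopY1 M ys

-- condition of A's second (quadruple) scan
def aP2 (M : List (List Int)) (y x t u : Nat) : Bool :=
  decide (u ≠ x ∧ t ≠ y) &&
    (let c := pvGet M y x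
     decide (pvGet M t u ≥ c ∧ (pvGet M t x < c ∨ pvGet M y u < c)))

def aLoopU (M : List (List Int)) (y x t : Nat) : List Nat → Option String
  | [] => none
  | u :: us => if aP2 M y x t u then some "NO" else aLoopU M y x t us

def aLoopT (M : List (List Int)) (y x : Nat) : List Nat → Option String
  | [] => none
  | t :: ts =>
    match aLoopU M y x t (List.range (M.getD y []).length) with
    | some s => some s
    | none => aLoopT M y x ts

def aLoopX2 (M : List (List Int)) (y : Nat) : List Nat → Option String
  | [] => none
  | x :: xs =>
    match aLoopT M y x (List.range M.length) with
    | some s => some s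
    | none => aLoopX2 M y xs

def aLoopY2 (M : List (List Int)) : List Nat → Option String
  | [] => none
  | y :: ys =>
    match aLoopX2 M y (List.range (M.getD 0 []).length) with
    | some s => some s
    | none => aLoopY2 M ys

def solve (matrix : List (List Int)) : String :=
  match aLoopY1 matrix (List.range (matrix.length - 1)) with
  | some s => s
  | none =>
    match aLoopY2 matrix (List.range matrix.length) with
    | some s => s
    | none => "YES"

-- ===== PORT B =====
-- "v if acc is None or v > acc else acc"
def omaxg (acc : Option Int) (v : Int) : Option Int :=
  match acc with
  | none => some v
  | some a => if v > a then some v else some a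

-- pre[i] = max of vals[0:i] (None if empty), built left to right as in B
def preAux (acc : Option Int) : List Int → List (Option Int)
  | [] => []
  | v :: vs => let a := omaxg acc v; a :: preAux a vs

def preTab (vals : List Int) : List (Option Int) := none :: preAux none vals

-- suf[i] = max of vals[i:] (None if empty), built right to left as in B
def sufTab : List Int → List (Option Int)
  | [] => [none]
  | v :: vs => let t := sufTab vs; omaxg (t.headD none) v :: t

-- B's comb(a, b)
def comb : Option Int → Option Int → Option Int
  | a, none => a
  | none, some b => some b
  | some a, some b => if a ≥ b then some a else some b

-- "mx is not None and mx >= c"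
def geOpt (o : Option Int) (c : Int) : Bool :=
  match o with
  | none => false
  | some v => decide (v ≥ c)

-- max of vals with index i excluded, compared with c
def exclGe (tab : List (Option Int) × List (Option Int)) (i : Nat) (c : Int) : Bool :=
  geOpt (comb (tab.1.getD i none) (tab.2.getD (i+1) none)) c

-- B's phase-1 condition (A's two identical elif/else branches merged)
def bP1 (M : List (List Int)) (y x : Nat) : Bool :=
  let c := pvGet M y x
  let op := pvGet M (y+1) (x+1)
  if op > c then decide (pvGet M y (x+1) > c ∧ pvGet M (y+1) x > c)
  else decide (pvGet M y (x+1) ≠ op ∧ pvGet M (y+1) x ≠ op)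

def bRow1 (M : List (List Int)) (y : Nat) : List Nat → Option String
  | [] => none
  | x :: xs => if bP1 M y x then some "NO" else bRow1 M y xs

def bLoopY1 (M : List (List Int)) (m : Nat) : List Nat → Option String
  | [] => none
  | y :: ys =>
    match bRow1 M y (List.range (m - 1)) with
    | some s => some s
    | none => bLoopY1 M m ys

def bPT (M : List (List Int)) (rows : List (List (Option Int) × List (Option Int)))
    (y x : Nat) (c : Int) (t : Nat) : Bool :=
  decide (t ≠ y ∧ pvGet M t x < c) && exclGe (rows.getD t ([], [])) x c

def bLoopT (M : List (List Int)) (rows : List (List (Option Int) × List (Option Int)))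
    (y x : Nat) (c : Int) : List Nat → Option String
  | [] => none
  | t :: ts => if bPT M rows y x c t then some "NO" else bLoopT M rows y x c ts

def bPU (M : List (List Int)) (cols : List (List (Option Int) × List (Option Int)))
    (y x : Nat) (c : Int) (u : Nat) : Bool :=
  decide (u ≠ x ∧ pvGet M y u < c) && exclGe (cols.getD u ([], [])) y c

def bLoopU (M : List (List Int)) (cols : List (List (Option Int) × List (Option Int)))
    (y x : Nat) (c : Int) : List Nat → Option String
  | [] => none
  | u :: us => if bPU M cols y x c u then some "NO" else bLoopU M cols y x c us

def bLoopX2 (M : List (List Int)) (rows cols : List (List (Option Int) × List (Option Int)))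
    (m : Nat) (y : Nat) : List Nat → Option String
  | [] => none
  | x :: xs =>
    let c := pvGet M y x
    match bLoopT M rows y x c (List.range M.length) with
    | some s => some s
    | none =>
      match bLoopU M cols y x c (List.range m) with
      | some s => some s
      | none => bLoopX2 M rows cols m y xs

def bLoopY2 (M : List (List Int)) (rows cols : List (List (Option Int) × List (Option Int)))
    (m : Nat) : List Nat → Option String
  | [] => none
  | y :: ys =>
    match bLoopX2 M rows cols m y (List.range m) with
    | some s => some s
    | none => bLoopY2 M rows cols m ys

def solve_alt (matrix : List (List Int)) : String :=
  if matrix.length = 0 then "YES"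
  else
    let m := (matrix.getD 0 []).length
    match bLoopY1 matrix m (List.range (matrix.length - 1)) with
    | some s => s
    | none =>
      let rows := matrix.map (fun r => (preTab r, sufTab r))
      let cols := (List.range m).map
        (fun u => let cv := matrix.map (fun r => r.getD u 0); (preTab cv, sufTab cv))
      match bLoopY2 matrix rows cols m (List.range matrix.length) with
      | some s => s
      | none => "YES"

-- ===== PRECONDITION & SPEC =====
-- Pre_ requires a rectangular matrix (every row as long as row 0): on ragged input A
-- indexes past the end of some row and raises IndexError, except when an earlier check
-- already returned — that accidental early exit is excluded too (see claim cites).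
def Pre_solve (matrix : List (List Int)) : Prop :=
  ∀ row ∈ matrix, row.length = (matrix.getD 0 []).length

instance (matrix : List (List Int)) : Decidable (Pre_solve matrix) := by
  unfold Pre_solve; infer_instance

def pvWitness_solve : List (List Int) := [[1, 2], [2, 3]]

def Spec_solve (matrix : List (List Int)) (out : String) : Prop := out = solve_alt matrix
instance (matrix : List (List Int)) (out : String) : Decidable (Spec_solve matrix out) := by
  unfold Spec_solve; infer_instance

-- ===== CLAIM (what is proved, stated in full; the proofs are below) =====
def Claim_equal_solve : Prop :=
  ∀ (matrix : List (List Int)), Dom_solve matrix → Pre_solve matrix →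
    Spec_solve matrix (solve matrix)


-- ===== LEMMAS AND PROOFS =====

-- each early-return loop returns some "NO" iff some element satisfies its condition
theorem aRow1_eq (M : List (List Int)) (y : Nat) (xs : List Nat) :
    aRow1 M y xs = if xs.any (aP1 M y) then some "NO" else none := by
  induction xs with
  | nil => simp [aRow1]
  | cons x xs ih => cases h : aP1 M y x <;> simp [aRow1, h, ih]

theorem aLoopY1_eq (M : List (List Int)) (ys : List Nat) :
    aLoopY1 M ys =
      if ys.any (fun y => (List.range ((M.getD 0 []).length - 1)).any (aP1 M y))
      then some "NO" else none := by
  induction ys with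
  | nil => simp [aLoopY1]
  | cons y ys ih =>
    rw [aLoopY1, aRow1_eq, ih, List.any_cons]
    generalize (List.range ((M.getD 0 []).length - 1)).any (aP1 M y) = b
    cases b <;> simp

theorem aLoopU_eq (M : List (List Int)) (y x t : Nat) (us : List Nat) :
    aLoopU M y x t us = if us.any (aP2 M y x t) then some "NO" else none := by
  induction us with
  | nil => simp [aLoopU]
  | cons u us ih => cases h : aP2 M y x t u <;> simp [aLoopU, h, ih]

theorem aLoopT_eq (M : List (List Int)) (y x : Nat) (ts : List Nat) :
    aLoopT M y x ts =
      if ts.any (fun t => (List.range (M.getD y []).length).any (aP2 M y x t))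
      then some "NO" else none := by
  induction ts with
  | nil => simp [aLoopT]
  | cons t ts ih =>
    rw [aLoopT, aLoopU_eq, ih, List.any_cons]
    generalize (List.range (M.getD y []).length).any (aP2 M y x t) = b
    cases b <;> simp

theorem aLoopX2_eq (M : List (List Int)) (y : Nat) (xs : List Nat) :
    aLoopX2 M y xs =
      if xs.any (fun x => (List.range M.length).any
          (fun t => (List.range (M.getD y []).length).any (aP2 M y x t)))
      then some "NO" else none := by
  induction xs with
  | nil => simp [aLoopX2]
  | cons x xs ih =>
    rw [aLoopX2, aLoopT_eq, ih, List.any_cons]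
    generalize (List.range M.length).any
        (fun t => (List.range (M.getD y []).length).any (aP2 M y x t)) = b
    cases b <;> simp

theorem aLoopY2_eq (M : List (List Int)) (ys : List Nat) :
    aLoopY2 M ys =
      if ys.any (fun y => (List.range ((M.getD 0 []).length)).any
          (fun x => (List.range M.length).any
            (fun t => (List.range (M.getD y []).length).any (aP2 M y x t))))
      then some "NO" else none := by
  induction ys with
  | nil => simp [aLoopY2]
  | cons y ys ih =>
    rw [aLoopY2, aLoopX2_eq, ih, List.any_cons]
    generalize (List.range ((M.getD 0 []).length)).any
        (fun x => (List.range M.length).any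
          (fun t => (List.range (M.getD y []).length).any (aP2 M y x t))) = b
    cases b <;> simp

theorem bRow1_eq (M : List (List Int)) (y : Nat) (xs : List Nat) :
    bRow1 M y xs = if xs.any (bP1 M y) then some "NO" else none := by
  induction xs with
  | nil => simp [bRow1]
  | cons x xs ih => cases h : bP1 M y x <;> simp [bRow1, h, ih]

theorem bLoopY1_eq (M : List (List Int)) (m : Nat) (ys : List Nat) :
    bLoopY1 M m ys =
      if ys.any (fun y => (List.range (m - 1)).any (bP1 M y)) then some "NO" else none := by
  induction ys with
  | nil => simp [bLoopY1]
  | cons y ys ih =>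
    rw [bLoopY1, bRow1_eq, ih, List.any_cons]
    generalize (List.range (m - 1)).any (bP1 M y) = b
    cases b <;> simp

theorem bLoopT_eq (M : List (List Int)) (rows : List (List (Option Int) × List (Option Int)))
    (y x : Nat) (c : Int) (ts : List Nat) :
    bLoopT M rows y x c ts = if ts.any (bPT M rows y x c) then some "NO" else none := by
  induction ts with
  | nil => simp [bLoopT]
  | cons t ts ih => cases h : bPT M rows y x c t <;> simp [bLoopT, h, ih]

theorem bLoopU_eq (M : List (List Int)) (cols : List (List (Option Int) × List (Option Int)))
    (y x : Nat) (c : Int) (us : List Nat) :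
    bLoopU M cols y x c us = if us.any (bPU M cols y x c) then some "NO" else none := by
  induction us with
  | nil => simp [bLoopU]
  | cons u us ih => cases h : bPU M cols y x c u <;> simp [bLoopU, h, ih]

theorem bLoopX2_eq (M : List (List Int)) (rows cols : List (List (Option Int) × List (Option Int)))
    (m y : Nat) (xs : List Nat) :
    bLoopX2 M rows cols m y xs =
      if xs.any (fun x => (List.range M.length).any (bPT M rows y x (pvGet M y x)) ||
          (List.range m).any (bPU M cols y x (pvGet M y x)))
      then some "NO" else none := by
  induction xs with
  | nil => simp [bLoopX2]
  | cons x xs ih =>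
    rw [bLoopX2, bLoopT_eq, bLoopU_eq, ih, List.any_cons]
    generalize (List.range M.length).any (bPT M rows y x (pvGet M y x)) = b1
    generalize (List.range m).any (bPU M cols y x (pvGet M y x)) = b2
    cases b1 <;> cases b2 <;> simp

theorem bLoopY2_eq (M : List (List Int)) (rows cols : List (List (Option Int) × List (Option Int)))
    (m : Nat) (ys : List Nat) :
    bLoopY2 M rows cols m ys =
      if ys.any (fun y => (List.range m).any
          (fun x => (List.range M.length).any (bPT M rows y x (pvGet M y x)) ||
            (List.range m).any (bPU M cols y x (pvGet M y x))))
      then some "NO" else none := by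
  induction ys with
  | nil => simp [bLoopY2]
  | cons y ys ih =>
    rw [bLoopY2, bLoopX2_eq, ih, List.any_cons]
    generalize (List.range m).any
        (fun x => (List.range M.length).any (bPT M rows y x (pvGet M y x)) ||
          (List.range m).any (bPU M cols y x (pvGet M y x))) = b
    cases b <;> simp

-- ===== semantics of the prefix/suffix max tables =====

theorem geOpt_omaxg (acc : Option Int) (v c : Int) :
    geOpt (omaxg acc v) c = (geOpt acc c || decide (c ≤ v)) := by
  cases acc with
  | none => simp [omaxg, geOpt]
  | some a =>
    simp only [omaxg]
    split <;> rename_i h <;>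
      by_cases hc : c ≤ v <;> by_cases hc2 : c ≤ a <;>
        simp [geOpt, hc, hc2] <;> omega

theorem geOpt_comb (a b : Option Int) (c : Int) :
    geOpt (comb a b) c = (geOpt a c || geOpt b c) := by
  cases a with
  | none => cases b <;> simp [comb, geOpt]
  | some a =>
    cases b with
    | none => simp [comb, geOpt]
    | some b =>
      simp only [comb]
      split <;> rename_i h <;>
        by_cases hc : c ≤ a <;> by_cases hc2 : c ≤ b <;>
          simp [geOpt, hc, hc2] <;> omega

theorem geOpt_preAux (c : Int) (vals : List Int) :
    ∀ (acc : Option Int) (k : Nat), k < vals.length →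
      (geOpt ((preAux acc vals).getD k none) c = true ↔
        geOpt acc c = true ∨ ∃ v ∈ vals.take (k+1), c ≤ v) := by
  induction vals with
  | nil => intro acc k hk; simp at hk
  | cons v vs ih =>
    intro acc k hk
    cases k with
    | zero =>
      simp [preAux, geOpt_omaxg]
    | succ k =>
      have hk' : k < vs.length := by simpa using hk
      have := ih (omaxg acc v) k hk'
      simp only [preAux, List.getD_cons_succ] at *
      rw [this, geOpt_omaxg]
      simp only [List.take_succ_cons, List.mem_cons, Bool.or_eq_true, decide_eq_true_eq]
      constructor
      · rintro ((h | h) | ⟨w, hw, hcw⟩)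
        · exact Or.inl h
        · exact Or.inr ⟨v, Or.inl rfl, h⟩
        · exact Or.inr ⟨w, Or.inr hw, hcw⟩
      · rintro (h | ⟨w, rfl | hw, hcw⟩)
        · exact Or.inl (Or.inl h)
        · exact Or.inl (Or.inr hcw)
        · exact Or.inr ⟨w, hw, hcw⟩

theorem geOpt_preTab (c : Int) (vals : List Int) (k : Nat) (hk : k ≤ vals.length) :
    geOpt ((preTab vals).getD k none) c = true ↔ ∃ v ∈ vals.take k, c ≤ v := by
  cases k with
  | zero => simp [preTab, geOpt]
  | succ k =>
    have hk' : k < vals.length := hk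
    rw [preTab, List.getD_cons_succ, geOpt_preAux c vals none k hk']
    simp [geOpt]

theorem headD_eq_getD_zero {α : Type} (l : List α) (d : α) : l.headD d = l.getD 0 d := by
  cases l <;> simp

theorem geOpt_sufTab (c : Int) (vals : List Int) :
    ∀ (k : Nat), geOpt ((sufTab vals).getD k none) c = true ↔ ∃ v ∈ vals.drop k, c ≤ v := by
  induction vals with
  | nil =>
    intro k
    cases k <;> simp [sufTab, geOpt]
  | cons v vs ih =>
    intro k
    cases k with
    | zero =>
      simp only [sufTab, List.getD_cons_zero, geOpt_omaxg, headD_eq_getD_zero]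
      rw [Bool.or_eq_true, ih 0]
      simp only [List.drop_zero, List.mem_cons, decide_eq_true_eq]
      constructor
      · rintro (⟨w, hw, hcw⟩ | h)
        · exact ⟨w, Or.inr hw, hcw⟩
        · exact ⟨v, Or.inl rfl, h⟩
      · rintro ⟨w, rfl | hw, hcw⟩
        · exact Or.inr hcw
        · exact Or.inl ⟨w, hw, hcw⟩
    | succ k =>
      simp only [sufTab, List.getD_cons_succ, List.drop_succ_cons]
      exact ih k

-- the combined test: "some element of vals at an index ≠ i is ≥ c"
theorem exclGe_iff (vals : List Int) (x : Nat) (hx : x < vals.length) (c : Int) :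
    exclGe (preTab vals, sufTab vals) x c = true ↔
      ∃ u, u < vals.length ∧ u ≠ x ∧ c ≤ vals.getD u 0 := by
  rw [exclGe, geOpt_comb, Bool.or_eq_true,
    geOpt_preTab c vals x (le_of_lt hx), geOpt_sufTab c vals (x+1)]
  constructor
  · rintro (⟨v, hv, hcv⟩ | ⟨v, hv, hcv⟩)
    · rw [List.mem_iff_getElem] at hv
      obtain ⟨i, hi, rfl⟩ := hv
      rw [List.length_take] at hi
      have hiv : i < vals.length := by omega
      refine ⟨i, hiv, by omega, ?_⟩
      rw [List.getD_eq_getElem _ _ hiv]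
      simpa [List.getElem_take] using hcv
    · rw [List.mem_iff_getElem] at hv
      obtain ⟨i, hi, rfl⟩ := hv
      rw [List.length_drop] at hi
      have hiv : x + 1 + i < vals.length := by omega
      refine ⟨x + 1 + i, hiv, by omega, ?_⟩
      rw [List.getD_eq_getElem _ _ hiv]
      simpa [List.getElem_drop] using hcv
  · rintro ⟨u, hu, hux, hcu⟩
    rw [List.getD_eq_getElem _ _ hu] at hcu
    rcases Nat.lt_or_ge u x with h | h
    · refine Or.inl ⟨vals[u], ?_, hcu⟩
      rw [List.mem_iff_getElem]
      refine ⟨u, by rw [List.length_take]; omega, ?_⟩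
      simp [List.getElem_take]
    · have h' : x < u := by omega
      refine Or.inr ⟨vals[u], ?_, hcu⟩
      rw [List.mem_iff_getElem]
      refine ⟨u - (x + 1), by rw [List.length_drop]; omega, ?_⟩
      have h2 : x + 1 + (u - (x + 1)) = u := by omega
      simp only [List.getElem_drop]
      congr 1

-- A's three phase-1 branches are B's two (the elif/else bodies are identical)
theorem aP1_eq_bP1 (M : List (List Int)) (y x : Nat) : aP1 M y x = bP1 M y x := by
  unfold aP1 bP1
  by_cases h : pvGet M (y+1) (x+1) > pvGet M y x
  · simp [h]
  · simp only [h, if_false]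
    by_cases h2 : pvGet M (y+1) (x+1) < pvGet M y x <;> simp [h2]

-- the per-cell logical split of A's quadruple-scan condition
theorem cell_iff (n m : Nat) (f : Nat → Nat → Int) (c : Int) (y x : Nat) :
    (∃ t, t < n ∧ ∃ u, u < m ∧ ((u ≠ x ∧ t ≠ y) ∧ c ≤ f t u ∧ (f t x < c ∨ f y u < c)))
      ↔ ((∃ t, t < n ∧ (t ≠ y ∧ f t x < c) ∧ ∃ u, u < m ∧ u ≠ x ∧ c ≤ f t u)
        ∨ (∃ u, u < m ∧ (u ≠ x ∧ f y u < c) ∧ ∃ t, t < n ∧ t ≠ y ∧ c ≤ f t u)) := by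
  constructor
  · rintro ⟨t, ht, u, hu, ⟨hux, hty⟩, hge, h | h⟩
    · exact Or.inl ⟨t, ht, ⟨hty, h⟩, u, hu, hux, hge⟩
    · exact Or.inr ⟨u, hu, ⟨hux, h⟩, t, ht, hty, hge⟩
  · rintro (⟨t, ht, ⟨hty, hlt⟩, u, hu, hux, hge⟩ | ⟨u, hu, ⟨hux, hlt⟩, t, ht, hty, hge⟩)
    · exact ⟨t, ht, u, hu, ⟨hux, hty⟩, hge, Or.inl hlt⟩
    · exact ⟨t, ht, u, hu, ⟨hux, hty⟩, hge, Or.inr hlt⟩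

-- ===== assembling the two programs =====

theorem getD_map_of_lt {α β : Type} (f : α → β) (l : List α) (t : Nat) (d : β) (d' : α)
    (h : t < l.length) : (l.map f).getD t d = f (l.getD t d') := by
  rw [List.getD_eq_getElem _ _ (by simpa using h), List.getD_eq_getElem _ _ h, List.getElem_map]

theorem rowLen (M : List (List Int)) (hP : Pre_solve M) (y : Nat) (hy : y < M.length) :
    (M.getD y []).length = (M.getD 0 []).length := by
  have hm : M.getD y [] ∈ M := by
    rw [List.getD_eq_getElem _ _ hy]; exact List.getElem_mem _
  exact hP _ hm

theorem solve_eq (M : List (List Int)) :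
    solve M =
      if ((List.range (M.length - 1)).any
            (fun y => (List.range ((M.getD 0 []).length - 1)).any (aP1 M y))
          || (List.range M.length).any (fun y => (List.range ((M.getD 0 []).length)).any
              (fun x => (List.range M.length).any
                (fun t => (List.range (M.getD y []).length).any (aP2 M y x t)))))
      then "NO" else "YES" := by
  rw [solve, aLoopY1_eq, aLoopY2_eq]
  generalize (List.range (M.length - 1)).any
      (fun y => (List.range ((M.getD 0 []).length - 1)).any (aP1 M y)) = b1
  generalize (List.range M.length).any (fun y => (List.range ((M.getD 0 []).length)).any
      (fun x => (List.range M.length).any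
        (fun t => (List.range (M.getD y []).length).any (aP2 M y x t)))) = b2
  cases b1 <;> cases b2 <;> simp

theorem solve_alt_eq (M : List (List Int)) (h : ¬ M.length = 0) :
    solve_alt M =
      if ((List.range (M.length - 1)).any
            (fun y => (List.range ((M.getD 0 []).length - 1)).any (bP1 M y))
          || (List.range M.length).any (fun y => (List.range ((M.getD 0 []).length)).any
              (fun x => (List.range M.length).any
                  (bPT M (M.map (fun r => (preTab r, sufTab r))) y x (pvGet M y x)) ||
                (List.range ((M.getD 0 []).length)).any
                  (bPU M ((List.range ((M.getD 0 []).length)).map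
                      (fun u => (preTab (M.map (fun r => r.getD u 0)),
                                 sufTab (M.map (fun r => r.getD u 0)))))
                    y x (pvGet M y x)))))
      then "NO" else "YES" := by
  rw [solve_alt, if_neg h]
  simp only [bLoopY1_eq, bLoopY2_eq]
  generalize (List.range (M.length - 1)).any
      (fun y => (List.range ((M.getD 0 []).length - 1)).any (bP1 M y)) = b1
  generalize (List.range M.length).any (fun y => (List.range ((M.getD 0 []).length)).any
      (fun x => (List.range M.length).any
          (bPT M (M.map (fun r => (preTab r, sufTab r))) y x (pvGet M y x)) ||
        (List.range ((M.getD 0 []).length)).any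
          (bPU M ((List.range ((M.getD 0 []).length)).map
              (fun u => (preTab (M.map (fun r => r.getD u 0)),
                         sufTab (M.map (fun r => r.getD u 0)))))
            y x (pvGet M y x)))) = b2
  cases b1 <;> cases b2 <;> simp

theorem cellA_iff_cellB (M : List (List Int)) (hP : Pre_solve M) (y x : Nat)
    (hy : y < M.length) (hx : x < (M.getD 0 []).length) :
    (∃ t, t < M.length ∧ ∃ u, u < (M.getD y []).length ∧ aP2 M y x t u = true)
      ↔ ((∃ t, t < M.length ∧
            bPT M (M.map (fun r => (preTab r, sufTab r))) y x (pvGet M y x) t = true)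
        ∨ (∃ u, u < (M.getD 0 []).length ∧
            bPU M ((List.range ((M.getD 0 []).length)).map
                (fun u => (preTab (M.map (fun r => r.getD u 0)),
                           sufTab (M.map (fun r => r.getD u 0)))))
              y x (pvGet M y x) u = true)) := by
  rw [rowLen M hP y hy]
  have hA : (∃ t, t < M.length ∧ ∃ u, u < (M.getD 0 []).length ∧ aP2 M y x t u = true)
      ↔ (∃ t, t < M.length ∧ ∃ u, u < (M.getD 0 []).length ∧
          ((u ≠ x ∧ t ≠ y) ∧ pvGet M y x ≤ pvGet M t u ∧
            (pvGet M t x < pvGet M y x ∨ pvGet M y u < pvGet M y x))) := by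
    simp only [aP2, Bool.and_eq_true, decide_eq_true_eq, ge_iff_le]
  refine hA.trans ((cell_iff M.length ((M.getD 0 []).length) (pvGet M) (pvGet M y x) y x).trans
    (or_congr ?_ ?_))
  · refine exists_congr fun t => and_congr_right fun ht => ?_
    have hrt : (M.map (fun r => (preTab r, sufTab r))).getD t ([], []) =
        (preTab (M.getD t []), sufTab (M.getD t [])) := getD_map_of_lt _ _ _ _ [] ht
    have hxlen : x < (M.getD t []).length := by rw [rowLen M hP t ht]; exact hx
    simp only [bPT, Bool.and_eq_true, decide_eq_true_eq, hrt]
    rw [exclGe_iff _ x hxlen _, rowLen M hP t ht]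
    exact Iff.rfl
  · refine exists_congr fun u => and_congr_right fun hu => ?_
    have hcu : ((List.range ((M.getD 0 []).length)).map
        (fun u => (preTab (M.map (fun r => r.getD u 0)),
                   sufTab (M.map (fun r => r.getD u 0))))).getD u ([], []) =
        (preTab (M.map (fun r => r.getD ((List.range ((M.getD 0 []).length)).getD u 0) 0)),
         sufTab (M.map (fun r => r.getD ((List.range ((M.getD 0 []).length)).getD u 0) 0))) :=
      getD_map_of_lt _ _ _ _ 0 (by simpa using hu)
    have hru : (List.range ((M.getD 0 []).length)).getD u 0 = u := by
      rw [List.getD_eq_getElem _ _ (by simpa using hu), List.getElem_range]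
    rw [hru] at hcu
    have hylen : y < (M.map (fun r => r.getD u 0)).length := by simpa using hy
    simp only [bPU, Bool.and_eq_true, decide_eq_true_eq, hcu]
    rw [exclGe_iff _ y hylen _]
    constructor
    · rintro ⟨⟨hux, hlt⟩, t, ht, hty, hge⟩
      refine ⟨⟨hux, hlt⟩, t, by simpa using ht, hty, ?_⟩
      rw [getD_map_of_lt (fun r => r.getD u 0) M t 0 [] ht]
      exact hge
    · rintro ⟨⟨hux, hlt⟩, t, ht, hty, hge⟩
      have ht' : t < M.length := by simpa using ht
      refine ⟨⟨hux, hlt⟩, t, ht', hty, ?_⟩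
      rw [getD_map_of_lt (fun r => r.getD u 0) M t 0 [] ht'] at hge
      exact hge

-- ===== VERDICT (by name: the statement is the Claim_ definition above) =====
theorem solve_spec : Claim_equal_solve := by
  intro M _ hP
  unfold Spec_solve
  by_cases h0 : M.length = 0
  · have hM : M = [] := List.length_eq_zero_iff.mp h0
    subst hM; rfl
  · rw [solve_eq, solve_alt_eq M h0]
    refine if_congr ?_ rfl rfl
    simp only [Bool.or_eq_true, List.any_eq_true, List.mem_range, aP1_eq_bP1]
    refine or_congr Iff.rfl (exists_congr fun y => and_congr_right fun hy =>
      exists_congr fun x => and_congr_right fun hx => ?_)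
    exact cellA_iff_cellB M hP y x hy hx
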